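-- pv_equiv track=rewrite | github.com/maggie-jiayizhang/xz_ctrl | src/app.py | convert_to_arduino_commands
-- ===== SOURCE A (Python) =====
-- from typing import List
--
-- def convert_to_arduino_commands(lines: List[str]) -> List[str]:
--     # Expand loop/endloop; support nesting
--     out: List[str] = []
--     stack = []  # list of tuples (repeat_count, body_lines)
--
--     def push_line(target_list: List[str], line: str):
--         s = line.strip()
--         if not s or s.startswith('#'):
--             return
--         # Allowed commands: move x/z D | speed x/z S | wait T | pulse T | zero z
--         parts = s.split()
--         cmd = parts[0].lower()
--         if cmd in ("move", "speed", "wait", "pulse", "zero", "report"):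
--             target_list.append(s)
--
--     for raw in lines:
--         line = raw.strip()
--         if not line or line.startswith('#'):
--             continue
--         parts = line.split()
--         cmd = parts[0].lower()
--
--         if cmd == 'loop' and len(parts) == 2 and parts[1].isdigit():
--             stack.append((int(parts[1]), []))
--             continue
--         if cmd == 'endloop':
--             if not stack:
--                 # unmatched endloop ignored (validator should catch)
--                 continue
--             count, body = stack.pop()
--             expanded = body * count
--             if stack:
--                 # add into upper loop body
--                 stack[-1][1].extend(expanded)
--             else:
--                 out.extend(expanded)
--             continue
--
--         # normal command
--         if stack:
--             push_line(stack[-1][1], line)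
--         else:
--             push_line(out, line)
--
--     return out
-- ===== SOURCE B (Python) =====
-- # Recursive-descent re-implementation: a shared iterator is consumed lazily;
-- # each loop body is parsed by a recursive helper instead of an explicit stack.
-- from typing import List
--
-- _ALLOWED = ("move", "speed", "wait", "pulse", "zero", "report")
--
--
-- def _classify(raw: str):
--     s = raw.strip()
--     if not s or s.startswith('#'):
--         return ('skip', None)
--     parts = s.split()
--     cmd = parts[0].lower()
--     if cmd == 'loop' and len(parts) == 2 and parts[1].isdigit():
--         return ('loop', int(parts[1]))
--     if cmd == 'endloop':
--         return ('end', None)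
--     if cmd in _ALLOWED:
--         return ('cmd', s)
--     return ('skip', None)
--
--
-- def _parse_body(it):
--     # Consume lines from the shared iterator until the matching 'endloop';
--     # return the collected (already expanded) body, or None if EOF came first.
--     body: List[str] = []
--     for raw in it:
--         kind, val = _classify(raw)
--         if kind == 'end':
--             return body
--         if kind == 'cmd':
--             body.append(val)
--         elif kind == 'loop':
--             inner = _parse_body(it)
--             if inner is None:
--                 return None
--             body.extend(inner * val)
--     return None
--
--
-- def convert_to_arduino_commands(lines: List[str]) -> List[str]:
--     out: List[str] = []
--     it = iter(lines)
--     for raw in it: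
--         kind, val = _classify(raw)
--         if kind == 'cmd':
--             out.append(val)
--         elif kind == 'loop':
--             inner = _parse_body(it)
--             if inner is None:
--                 break  # unclosed loop: A discards everything buffered after it
--             out.extend(inner * val)
--         # 'skip' lines and a stray top-level 'endloop' are ignored
--     return out
-- ===== Notes on version B (the rewrite author's own statement) =====
-- stated objective: alternative
-- what changed: Replaces A's single pass with an explicit stack of (count, body) frames by a recursive-descent parser: lines are classified once by a helper, loop bodies are parsed by a recursive function consuming a shared line stream and expanded body*N at the matching endloop.
import Mathlib
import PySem

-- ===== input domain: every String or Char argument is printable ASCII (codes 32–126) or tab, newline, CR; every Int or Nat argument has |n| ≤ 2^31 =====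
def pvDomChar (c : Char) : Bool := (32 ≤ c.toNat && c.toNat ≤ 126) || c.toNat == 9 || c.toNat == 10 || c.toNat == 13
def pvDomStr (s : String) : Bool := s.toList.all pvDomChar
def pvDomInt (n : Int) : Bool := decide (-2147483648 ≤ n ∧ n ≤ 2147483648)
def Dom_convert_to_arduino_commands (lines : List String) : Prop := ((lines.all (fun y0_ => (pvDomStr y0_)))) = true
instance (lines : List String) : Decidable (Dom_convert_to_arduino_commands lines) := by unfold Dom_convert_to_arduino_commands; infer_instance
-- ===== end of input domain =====

-- B replaces A's explicit loop stack by a recursive-descent parser over a shared line stream (alternative decomposition, same cost).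

-- ===== PORT A =====
-- push_line: append the stripped line iff non-blank, non-comment and its first word is an allowed command
def pushLine (target : List String) (line : String) : List String :=
  let s := PySem.Str.strip line
  if s = "" ∨ PySem.Str.startswith s "#" then target
  else
    let parts := PySem.Str.split₀ s
    let cmd := PySem.Str.lower (parts.headD "")
    if cmd = "move" ∨ cmd = "speed" ∨ cmd = "wait" ∨ cmd = "pulse" ∨ cmd = "zero" ∨ cmd = "report" then
      target ++ [s]
    else target

-- one iteration of A's for-loop; state = (out, stack), stack top at the HEAD (Python appends/pops at the end)
def stepA (st : List String × List (Int × List String)) (raw : String) : List String × List (Int × List String) :=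
  let out := st.1
  let stack := st.2
  let line := PySem.Str.strip raw
  if line = "" ∨ PySem.Str.startswith line "#" then (out, stack)
  else
    let parts := PySem.Str.split₀ line
    let cmd := PySem.Str.lower (parts.headD "")
    if cmd = "loop" ∧ parts.length = 2 ∧ PySem.Str.strIsdigit (parts.getD 1 "") then
      -- int(parts[1]): isdigit guarantees ofStr? = some, so getD 0 is exact here
      (out, ((PySem.Int.ofStr? (parts.getD 1 "")).getD 0, []) :: stack)
    else if cmd = "endloop" then
      match stack with
      | [] => (out, [])  -- unmatched endloop ignored
      | (count, body) :: rest =>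
        let expanded := PySem.List.pyRepeat body count
        match rest with
        | (c2, b2) :: rest2 => (out, (c2, b2 ++ expanded) :: rest2)
        | [] => (out ++ expanded, [])
    else
      match stack with
      | (c, b) :: rest => (out, (c, pushLine b line) :: rest)
      | [] => (pushLine out line, [])

def convert_to_arduino_commands (lines : List String) : List String :=
  (List.foldl stepA ([], []) lines).1

-- ===== PORT B =====
inductive PvTok where
  | skip : PvTok
  | loopTok : Int → PvTok
  | endTok : PvTok
  | cmdTok : String → PvTok
deriving DecidableEq, Repr

-- Source B's _classify
def pvClassify (raw : String) : PvTok :=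
  let s := PySem.Str.strip raw
  if s = "" ∨ PySem.Str.startswith s "#" then .skip
  else
    let parts := PySem.Str.split₀ s
    let cmd := PySem.Str.lower (parts.headD "")
    if cmd = "loop" ∧ parts.length = 2 ∧ PySem.Str.strIsdigit (parts.getD 1 "") then
      .loopTok ((PySem.Int.ofStr? (parts.getD 1 "")).getD 0)
    else if cmd = "endloop" then .endTok
    else if cmd = "move" ∨ cmd = "speed" ∨ cmd = "wait" ∨ cmd = "pulse" ∨ cmd = "zero" ∨ cmd = "report" then
      .cmdTok s
    else .skip

-- Source B's _parse_body: the shared iterator becomes the explicit remaining-line list,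
-- returned alongside the body; the Nat argument is pure fuel (totality guard only).
def pvParseBody : Nat → List String → List String → Option (List String × List String)
  | 0, _, _ => none
  | _ + 1, _, [] => none
  | f + 1, body, x :: xs =>
    match pvClassify x with
    | .endTok => some (body, xs)
    | .skip => pvParseBody f body xs
    | .cmdTok s => pvParseBody f (body ++ [s]) xs
    | .loopTok n =>
      match pvParseBody f [] xs with
      | none => none
      | some (inner, rest) => pvParseBody f (body ++ PySem.List.pyRepeat inner n) rest

-- Source B's top-level for-loop (fuel is again only a totality guard)
def pvParseTop : Nat → List String → List String → List String
  | 0, out, _ => out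
  | _ + 1, out, [] => out
  | f + 1, out, x :: xs =>
    match pvClassify x with
    | .skip => pvParseTop f out xs
    | .endTok => pvParseTop f out xs
    | .cmdTok s => pvParseTop f (out ++ [s]) xs
    | .loopTok n =>
      match pvParseBody f [] xs with
      | none => out
      | some (inner, rest) => pvParseTop f (out ++ PySem.List.pyRepeat inner n) rest

def convert_to_arduino_commands_alt (lines : List String) : List String :=
  pvParseTop lines.length [] lines

-- ===== PRECONDITION & SPEC =====
def Spec_convert_to_arduino_commands (lines : List String) (out : List String) : Prop := out = convert_to_arduino_commands_alt lines
instance (lines : List String) (out : List String) : Decidable (Spec_convert_to_arduino_commands lines out) := by unfold Spec_convert_to_arduino_commands; infer_instance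

-- ===== CLAIM (what is proved, stated in full; the proofs are below) =====
def Claim_equal_convert_to_arduino_commands : Prop := ∀ (lines : List String), Dom_convert_to_arduino_commands lines → Spec_convert_to_arduino_commands lines (convert_to_arduino_commands lines)

-- ===== LEMMAS AND PROOFS =====

-- strip is idempotent (needed because A's push_line re-strips the already-stripped line)
theorem pv_dropWhile_idem {α : Type} (p : α → Bool) (l : List α) :
    (l.dropWhile p).dropWhile p = l.dropWhile p := by
  induction l with
  | nil => simp
  | cons a t ih =>
    by_cases h : p a = true
    · simp [h, ih]
    · simp [h]

theorem pv_strip_idem (s : List Char) :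
    PySem.Chars.strip (PySem.Chars.strip s) = PySem.Chars.strip s := by
  have hpref : ∀ (m : List Char), m.dropWhile PySem.Chars.isspace = m →
      (m.reverse.dropWhile PySem.Chars.isspace).reverse.dropWhile PySem.Chars.isspace
        = (m.reverse.dropWhile PySem.Chars.isspace).reverse := by
    intro m hm
    have hsuf : (m.reverse.dropWhile PySem.Chars.isspace).reverse <+: m := by
      have hs : m.reverse.dropWhile PySem.Chars.isspace <:+ m.reverse := List.dropWhile_suffix _
      rcases hs with ⟨t, ht⟩
      refine ⟨t.reverse, ?_⟩
      have := congrArg List.reverse ht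
      simpa [List.reverse_append] using this
    rcases hsuf with ⟨t, htm⟩
    cases hr : (m.reverse.dropWhile PySem.Chars.isspace).reverse with
    | nil => simp
    | cons a r =>
      have hma : ∃ m', m = a :: m' := by
        refine ⟨r ++ t, ?_⟩
        rw [← htm, hr]; simp
      rcases hma with ⟨m', hm'⟩
      have hpa : PySem.Chars.isspace a = false := by
        by_contra hcon
        have hpa' : PySem.Chars.isspace a = true := by
          cases h' : PySem.Chars.isspace a with
          | false => exact absurd h' hcon
          | true => rfl
        rw [hm'] at hm
        simp [hpa'] at hm
        have := congrArg List.length hm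
        simp at this
        have h1 := List.length_dropWhile_le (p := PySem.Chars.isspace) (l := m')
        omega
      simp [hpa]
  unfold PySem.Chars.strip PySem.Chars.lstrip PySem.Chars.rstrip
  set m := s.dropWhile PySem.Chars.isspace with hm
  have hmfix : m.dropWhile PySem.Chars.isspace = m := by rw [hm]; exact pv_dropWhile_idem _ _
  rw [hpref m hmfix]
  simp [pv_dropWhile_idem]

theorem pv_str_strip_idem (s : String) :
    PySem.Str.strip (PySem.Str.strip s) = PySem.Str.strip s := by
  show String.ofList (PySem.Chars.strip (PySem.Str.strip s).toList) = PySem.Str.strip s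
  rw [PySem.Str.toList_strip, pv_strip_idem]
  rfl

-- one step of A, characterised by Source B's classification of the raw line
theorem pv_stepA_eq (out : List String) (stack : List (Int × List String)) (raw : String) :
    stepA (out, stack) raw =
      match pvClassify raw with
      | .skip => (out, stack)
      | .loopTok n => (out, (n, []) :: stack)
      | .endTok =>
        match stack with
        | [] => (out, [])
        | (c, b) :: rest =>
          match rest with
          | (c2, b2) :: rest2 => (out, (c2, b2 ++ PySem.List.pyRepeat b c) :: rest2)
          | [] => (out ++ PySem.List.pyRepeat b c, [])
      | .cmdTok s =>
        match stack with
        | (c, b) :: rest => (out, (c, b ++ [s]) :: rest)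
        | [] => (out ++ [s], []) := by
  unfold stepA pvClassify pushLine
  simp only [pv_str_strip_idem]
  split_ifs with h1 h2 h3 h4 <;> cases stack <;> simp_all

-- pvParseBody consumes at least one line (the matching endloop)
theorem pv_parseBody_length :
    ∀ (f : Nat) (b l body r : List String), pvParseBody f b l = some (body, r) → r.length < l.length := by
  intro f
  induction f with
  | zero => intro b l body r h; simp [pvParseBody] at h
  | succ f ih =>
    intro b l body r h
    cases l with
    | nil => simp [pvParseBody] at h
    | cons x xs =>
      unfold pvParseBody at h
      cases hc : pvClassify x with
      | skip => rw [hc] at h; have := ih _ _ _ _ h; simp; omega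
      | endTok => rw [hc] at h; simp at h; simp [← h.2]
      | cmdTok s => rw [hc] at h; have := ih _ _ _ _ h; simp; omega
      | loopTok n =>
        rw [hc] at h; simp at h
        cases hp : pvParseBody f [] xs with
        | none => rw [hp] at h; simp at h
        | some p =>
          rw [hp] at h; simp at h
          have h1 := ih _ _ _ _ hp
          have h2 := ih _ _ _ _ h
          simp at h1 ⊢; omega

-- pop-and-extend: what A does with the finished body of the top loop
def pvEndApply (out : List String) (c : Int) (body : List String)
    (st : List (Int × List String)) : List String × List (Int × List String) :=
  match st with
  | [] => (out ++ PySem.List.pyRepeat body c, [])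
  | (c2, b2) :: r2 => (out, (c2, b2 ++ PySem.List.pyRepeat body c) :: r2)

-- key invariant: A's run with a non-empty stack is B's body parse
theorem pv_loop_inv :
    ∀ (f : Nat) (rest : List String), rest.length ≤ f →
      ∀ (out : List String) (c : Int) (b : List String) (st : List (Int × List String)),
        (List.foldl stepA (out, (c, b) :: st) rest).1 =
          match pvParseBody f b rest with
          | none => out
          | some (body, rest') => (List.foldl stepA (pvEndApply out c body st) rest').1 := by
  intro f
  induction f with
  | zero =>
    intro rest hlen out c b st
    have : rest = [] := List.eq_nil_of_length_eq_zero (Nat.le_zero.mp hlen)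
    subst this; simp [pvParseBody]
  | succ f ih =>
    intro rest hlen out c b st
    cases rest with
    | nil => simp [pvParseBody]
    | cons x xs =>
      have hxs : xs.length ≤ f := by simp at hlen; omega
      rw [List.foldl_cons, pv_stepA_eq]
      cases hc : pvClassify x with
      | skip =>
        simp only [pvParseBody, hc]
        exact ih xs hxs out c b st
      | cmdTok s =>
        simp only [pvParseBody, hc]
        exact ih xs hxs out c (b ++ [s]) st
      | endTok =>
        simp only [pvParseBody, hc]
        cases st with
        | nil => simp [pvEndApply]
        | cons top r2 => cases top; simp [pvEndApply]
      | loopTok n =>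
        simp only [pvParseBody, hc]
        rw [ih xs hxs out n [] ((c, b) :: st)]
        cases hp : pvParseBody f [] xs with
        | none => simp
        | some p =>
          obtain ⟨inner, rest'⟩ := p
          have hr' : rest'.length ≤ f := by
            have h1 := pv_parseBody_length f [] xs inner rest' hp
            omega
          simp only [pvEndApply]
          exact ih rest' hr' out c (b ++ PySem.List.pyRepeat inner n) st

-- A's run with an empty stack is B's top-level parse
theorem pv_top_inv :
    ∀ (f : Nat) (rest : List String), rest.length ≤ f →
      ∀ (out : List String),
        (List.foldl stepA (out, []) rest).1 = pvParseTop f out rest := by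
  intro f
  induction f with
  | zero =>
    intro rest hlen out
    have : rest = [] := List.eq_nil_of_length_eq_zero (Nat.le_zero.mp hlen)
    subst this; simp [pvParseTop]
  | succ f ih =>
    intro rest hlen out
    cases rest with
    | nil => simp [pvParseTop]
    | cons x xs =>
      have hxs : xs.length ≤ f := by simp at hlen; omega
      rw [List.foldl_cons, pv_stepA_eq]
      cases hc : pvClassify x with
      | skip => simp only [pvParseTop, hc]; exact ih xs hxs out
      | endTok => simp only [pvParseTop, hc]; exact ih xs hxs out
      | cmdTok s => simp only [pvParseTop, hc]; exact ih xs hxs (out ++ [s])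
      | loopTok n =>
        simp only [pvParseTop, hc]
        rw [pv_loop_inv f xs hxs out n [] []]
        cases hp : pvParseBody f [] xs with
        | none => simp
        | some p =>
          obtain ⟨inner, rest'⟩ := p
          have hr' : rest'.length ≤ f := by
            have h1 := pv_parseBody_length f [] xs inner rest' hp
            omega
          simp only [pvEndApply]
          exact ih rest' hr' (out ++ PySem.List.pyRepeat inner n)

-- ===== VERDICT (by name: the statement is the Claim_ definition above) =====
theorem convert_to_arduino_commands_spec : Claim_equal_convert_to_arduino_commands := by
  intro lines _
  show convert_to_arduino_commands lines = convert_to_arduino_commands_alt lines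
  unfold convert_to_arduino_commands convert_to_arduino_commands_alt
  exact pv_top_inv lines.length lines (le_refl _) []
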